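-- pv_equiv track=rewrite | github.com/nsaw/gpt-cursor-runner | scripts/python-utils/fix_syntax.py | fix_indentation_errors
-- ===== SOURCE A (Python) =====
-- def fix_indentation_errors(content: str) -> str:
--     """Fix indentation errors."""
--     lines = content.split("\n")
--     fixed_lines = []
--     indent_stack = []
--
--     for line in lines:
--         stripped = line.strip()
--         if not stripped:
--             fixed_lines.append("")
--             continue
--
--         # Count leading spaces
--         leading_spaces = len(line) - len(line.lstrip())
--
--         # Determine expected indentation
--         if stripped.endswith(":"):
--             # This line should increase indentation
--             expected_indent = len(indent_stack) * 4
--             if leading_spaces != expected_indent: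
--                 line = " " * expected_indent + stripped
--             indent_stack.append(expected_indent + 4)
--         else:
--             # This line should match current indentation
--             expected_indent = len(indent_stack) * 4
--             if leading_spaces != expected_indent:
--                 line = " " * expected_indent + stripped
--
--         fixed_lines.append(line)
--
--     return "\n".join(fixed_lines)
-- ===== SOURCE B (Python) =====
-- def _fmt(line, depth):
--     stripped = line.strip()
--     if not stripped:
--         return ""
--     expected = depth * 4
--     leading = len(line) - len(line.lstrip())
--     return line if leading == expected else " " * expected + stripped
--
--
-- def fix_indentation_errors(content: str) -> str:
--     """Fix indentation errors (table-first two-pass rewrite)."""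
--     lines = content.split("\n")
--     flags = [bool(s) and s.endswith(":") for s in (l.strip() for l in lines)]
--     depths = []
--     t = 0
--     for f in flags:
--         depths.append(t)
--         if f:
--             t += 1
--     return "\n".join(_fmt(l, d) for l, d in zip(lines, depths))
-- ===== Notes on version B (the rewrite author's own statement) =====
-- stated objective: alternative
-- what changed: Replaced A's single stateful pass carrying a growing indent stack with a table-first two-pass structure: first a prefix-sum pass over colon-ending-nonblank flags builds a per-line depth table, then an independent per-line formatting pass renders each line from its precomputed depth.
import Mathlib
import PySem

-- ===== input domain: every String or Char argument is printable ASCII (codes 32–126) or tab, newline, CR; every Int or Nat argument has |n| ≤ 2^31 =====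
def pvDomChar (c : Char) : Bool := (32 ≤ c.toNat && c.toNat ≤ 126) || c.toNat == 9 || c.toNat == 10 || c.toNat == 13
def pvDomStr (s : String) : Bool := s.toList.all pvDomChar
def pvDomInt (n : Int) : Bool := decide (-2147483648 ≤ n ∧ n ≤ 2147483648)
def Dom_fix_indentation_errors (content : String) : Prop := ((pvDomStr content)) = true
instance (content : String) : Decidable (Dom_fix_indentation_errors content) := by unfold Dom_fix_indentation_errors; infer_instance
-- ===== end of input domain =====

-- B replaces A's single stateful pass (a growing indent stack) by a table-first two-pass
-- structure: precompute each line's depth as a prefix count of colon-ending non-blank lines,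
-- then format each line independently (objective: alternative decomposition, same cost).


-- ===== PORT A =====
-- A's loop body: state = (fixed_lines, indent_stack), exactly A's branches in order.
def pvAStep (acc : List (List Char) × List Int) (line : List Char) : List (List Char) × List Int :=
  let stripped := PySem.Chars.strip line
  if stripped.isEmpty then (acc.1 ++ [[]], acc.2)
  else
    let leading := line.length - (PySem.Chars.lstrip line).length
    if PySem.Chars.endswith stripped [':'] then
      let expected := acc.2.length * 4
      let line' := if leading ≠ expected then List.replicate expected ' ' ++ stripped else line
      (acc.1 ++ [line'], acc.2 ++ [((expected : Int) + 4)])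
    else
      let expected := acc.2.length * 4
      let line' := if leading ≠ expected then List.replicate expected ' ' ++ stripped else line
      (acc.1 ++ [line'], acc.2)

def fix_indentation_errors (content : String) : String :=
  let lines := PySem.Chars.splitOn content.toList ['\n']
  let st := lines.foldl pvAStep ([], [])
  String.ofList (PySem.Chars.join ['\n'] st.1)

-- ===== PORT B =====
def pvFmt (line : List Char) (depth : Nat) : List Char :=
  let stripped := PySem.Chars.strip line
  if stripped.isEmpty then []
  else
    let expected := depth * 4
    let leading := line.length - (PySem.Chars.lstrip line).length
    if leading = expected then line else List.replicate expected ' ' ++ stripped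

def pvFlag (line : List Char) : Bool :=
  let s := PySem.Chars.strip line
  !s.isEmpty && PySem.Chars.endswith s [':']

def fix_indentation_errors_alt (content : String) : String :=
  let lines := PySem.Chars.splitOn content.toList ['\n']
  let flags := lines.map pvFlag
  let depths := (flags.foldl
      (fun (acc : List Nat × Nat) f => (acc.1 ++ [acc.2], if f then acc.2 + 1 else acc.2))
      ([], 0)).1
  String.ofList (PySem.Chars.join ['\n'] ((lines.zip depths).map (fun p => pvFmt p.1 p.2)))

-- ===== PRECONDITION & SPEC =====
def Spec_fix_indentation_errors (content : String) (out : String) : Prop := out = fix_indentation_errors_alt content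
instance (content : String) (out : String) : Decidable (Spec_fix_indentation_errors content out) := by unfold Spec_fix_indentation_errors; infer_instance

-- ===== CLAIM (what is proved, stated in full; the proofs are below) =====
def Claim_equal_fix_indentation_errors : Prop := ∀ (content : String), Dom_fix_indentation_errors content → Spec_fix_indentation_errors content (fix_indentation_errors content)

-- ===== LEMMAS AND PROOFS =====

-- depth table: each line paired with the count of flagged lines before it (starting at k)
def pvDepthTable : List (List Char) → Nat → List (List Char × Nat)
  | [], _ => []
  | l :: ls, k => (l, k) :: pvDepthTable ls (if pvFlag l then k + 1 else k)

-- the exclusive-prefix-count list B's loop builds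
def pvDepths : List Bool → Nat → List Nat
  | [], _ => []
  | f :: fs, t => t :: pvDepths fs (if f then t + 1 else t)

theorem pvAStep_fold (lines : List (List Char)) (acc : List (List Char)) (stack : List Int) :
    (lines.foldl pvAStep (acc, stack)).1
      = acc ++ (pvDepthTable lines stack.length).map (fun p => pvFmt p.1 p.2) := by
  induction lines generalizing acc stack with
  | nil => simp [pvDepthTable]
  | cons l ls ih =>
    simp only [List.foldl_cons, pvDepthTable, List.map_cons]
    by_cases hempty : (PySem.Chars.strip l).isEmpty
    · have hflag : pvFlag l = false := by simp [pvFlag, hempty]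
      rw [show pvAStep (acc, stack) l = (acc ++ [[]], stack) by simp [pvAStep, hempty]]
      rw [ih, hflag]
      simp [pvFmt, hempty]
    · by_cases hcolon : PySem.Chars.endswith (PySem.Chars.strip l) [':'] = true
      · have hflag : pvFlag l = true := by simp [pvFlag, hempty, hcolon]
        rw [show pvAStep (acc, stack) l
            = (acc ++ [pvFmt l stack.length], stack ++ [((stack.length * 4 : Nat) : Int) + 4]) by
          simp only [pvAStep, pvFmt, hempty, hcolon, Bool.false_eq_true, if_false, if_true, ne_eq,
            ite_not]]
        rw [ih, hflag]
        simp
      · have hflag : pvFlag l = false := by simp [pvFlag, hempty, hcolon]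
        rw [show pvAStep (acc, stack) l = (acc ++ [pvFmt l stack.length], stack) by
          simp only [pvAStep, pvFmt, hempty, hcolon, Bool.false_eq_true, if_false, ne_eq, ite_not]]
        rw [ih, hflag]
        simp

theorem pvBStep_fold (flags : List Bool) (acc : List Nat) (t : Nat) :
    (flags.foldl
        (fun (acc : List Nat × Nat) f => (acc.1 ++ [acc.2], if f then acc.2 + 1 else acc.2))
        (acc, t)).1
      = acc ++ pvDepths flags t := by
  induction flags generalizing acc t with
  | nil => simp [pvDepths]
  | cons f fs ih => simp [pvDepths, ih]

theorem pvZip_depths (lines : List (List Char)) (k : Nat) :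
    lines.zip (pvDepths (lines.map pvFlag) k) = pvDepthTable lines k := by
  induction lines generalizing k with
  | nil => rfl
  | cons l ls ih => simp [pvDepths, pvDepthTable, ih]

-- ===== VERDICT (by name: the statement is the Claim_ definition above) =====
theorem fix_indentation_errors_spec : Claim_equal_fix_indentation_errors := by
  intro content _
  show _ = _
  unfold fix_indentation_errors fix_indentation_errors_alt
  simp only [pvAStep_fold, pvBStep_fold, List.nil_append, pvZip_depths, List.length_nil]
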